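-- pv_equiv track=rewrite | github.com/Hydrospheredata/hydro-serving | ml_runtimes/custom_scikit/src/cfepm/fe/feature_extractors.py | extract_by_comparison
-- ===== SOURCE A (Python) =====
-- def extract_by_comparison(v1, v2):
--     if isinstance(v1, list) and isinstance(v2, dict):
--         spec_dict = v2
--         txt_tokens = v1
--     elif isinstance(v2, list) and isinstance(v1, dict):
--         spec_dict = v1
--         txt_tokens = v2
--     else:
--         raise ValueError()
--     result_counter = 0
--     for key, val_tokens in spec_dict.items():
--         if contains_subseq(txt_tokens, val_tokens):
--             result_counter += 1
--     return result_counter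
--
-- def contains_subseq(seq, sub):
--     if len(sub) > len(seq):
--         return False
--     for i in range(0, len(seq) - len(sub) + 1):
--         if seq[i:i + len(sub)] == sub:
--             return True
--     return False
-- ===== SOURCE B (Python) =====
-- def extract_by_comparison(v1, v2):
--     if isinstance(v1, list) and isinstance(v2, dict):
--         tokens, spec = v1, v2
--     elif isinstance(v2, list) and isinstance(v1, dict):
--         tokens, spec = v2, v1
--     else:
--         raise ValueError()
--     # Pre-index: for every distinct spec-value length m, the hash set of all
--     # contiguous windows of 'tokens' of length m; each spec value is then a
--     # single O(1) set lookup instead of a scan over tokens.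
--     lengths = {len(val) for val in spec.values()}
--     windows = {m: {tuple(tokens[i:i + m]) for i in range(len(tokens) - m + 1)}
--                for m in lengths if m <= len(tokens)}
--     return sum(1 for val in spec.values()
--                if len(val) in windows and tuple(val) in windows[len(val)])
-- ===== Notes on version B (the rewrite author's own statement) =====
-- stated objective: faster
-- what changed: Replaces the per-spec-value sliding-window scan with a precomputed hash index: for each distinct spec-value length m it builds once the set of all length-m windows of the token list, so every spec value is checked by a single set lookup instead of scanning the tokens.
import Mathlib
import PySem

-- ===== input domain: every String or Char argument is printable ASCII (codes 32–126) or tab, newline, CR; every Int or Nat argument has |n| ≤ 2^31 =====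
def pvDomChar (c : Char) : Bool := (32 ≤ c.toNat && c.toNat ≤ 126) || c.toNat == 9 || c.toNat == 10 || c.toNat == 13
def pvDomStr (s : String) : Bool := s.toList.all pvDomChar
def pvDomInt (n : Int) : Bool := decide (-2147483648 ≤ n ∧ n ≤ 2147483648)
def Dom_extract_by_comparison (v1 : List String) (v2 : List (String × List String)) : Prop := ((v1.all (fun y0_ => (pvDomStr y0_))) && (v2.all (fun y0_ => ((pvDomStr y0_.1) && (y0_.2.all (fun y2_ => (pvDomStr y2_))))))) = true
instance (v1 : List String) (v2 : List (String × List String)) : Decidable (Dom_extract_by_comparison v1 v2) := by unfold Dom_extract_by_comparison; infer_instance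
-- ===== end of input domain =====

-- B replaces the per-spec-value sliding-window scan with a precomputed index: for each
-- distinct spec-value length m it builds once the set of all length-m windows of the
-- token list, so each spec value becomes a single set-membership lookup.

-- ===== PORT A =====
-- contains_subseq(seq, sub): index loop, slice-and-compare at each start position
def containsSubseq (seq sub : List String) : Bool :=
  if sub.length > seq.length then false
  else
    (PySem.List.pyRange 0 ((seq.length : Int) - (sub.length : Int) + 1) 1).any
      (fun i => PySem.List.slice seq (some i) (some (i + (sub.length : Int))) == sub)

def extract_by_comparison (v1 : List String) (v2 : List (String × List String)) : Int :=
  (PySem.Dict.ofList v2).items.foldl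
    (fun result_counter kv => if containsSubseq v1 kv.2 then result_counter + 1 else result_counter)
    0

-- ===== PORT B =====
-- {tuple(tokens[i:i+m]) for i in range(len(tokens)-m+1)}: the set of length-m windows
def windowSetB (tokens : List String) (m : Int) : PySem.Set (List String) :=
  PySem.Set.ofList
    ((PySem.List.pyRange 0 ((tokens.length : Int) - m + 1) 1).map
      (fun i => PySem.List.slice tokens (some i) (some (i + m))))

def extract_by_comparison_alt (v1 : List String) (v2 : List (String × List String)) : Int :=
  let spec := PySem.Dict.ofList v2
  let lengths : PySem.Set Int := PySem.Set.ofList (spec.values.map (fun val => (val.length : Int)))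
  let windows : PySem.Dict Int (PySem.Set (List String)) :=
    (lengths.filter (fun m => decide (m ≤ (v1.length : Int)))).foldl
      (fun d m => d.insert m (windowSetB v1 m)) PySem.Dict.empty
  (spec.values.countP (fun val =>
      match windows.get? (val.length : Int) with
      | none => false
      | some s => s.contains val) : Int)

-- ===== PRECONDITION & SPEC =====
def Spec_extract_by_comparison (v1 : List String) (v2 : List (String × List String)) (out : Int) : Prop := out = extract_by_comparison_alt v1 v2
instance (v1 : List String) (v2 : List (String × List String)) (out : Int) : Decidable (Spec_extract_by_comparison v1 v2 out) := by unfold Spec_extract_by_comparison; infer_instance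

-- ===== CLAIM (what is proved, stated in full; the proofs are below) =====
def Claim_equal_extract_by_comparison : Prop := ∀ (v1 : List String) (v2 : List (String × List String)), Dom_extract_by_comparison v1 v2 → Spec_extract_by_comparison v1 v2 (extract_by_comparison v1 v2)

-- ===== LEMMAS AND PROOFS =====

-- lookup in a dict built by inserting (m, f m) for every m of a list
theorem get?_foldl_insert_fn (L : List Int) (f : Int → PySem.Set (List String))
    (d : PySem.Dict Int (PySem.Set (List String))) (m : Int) :
    (L.foldl (fun d m => d.insert m (f m)) d).get? m
      = if m ∈ L then some (f m) else d.get? m := by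
  induction L generalizing d with
  | nil => simp
  | cons a L ih =>
    simp only [List.foldl_cons, ih, List.mem_cons]
    by_cases hL : m ∈ L
    · simp [hL]
    · by_cases ha : m = a
      · subst ha; simp [hL, PySem.Dict.get?_insert_self]
      · simp [hL, ha, PySem.Dict.get?_insert_of_ne _ _ ha]

-- B's per-value lookup equals A's sliding-window test, for any val whose length occurs in vals
theorem lookup_eq_containsSubseq (v1 : List String) (vals : List (List String))
    (val : List String) (hval : val ∈ vals) :
    (match ((PySem.Set.ofList (vals.map (fun val => (val.length : Int)))).filter
              (fun m => decide (m ≤ (v1.length : Int)))).foldl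
            (fun d m => d.insert m (windowSetB v1 m)) PySem.Dict.empty
            |>.get? (val.length : Int) with
      | none => false
      | some s => s.contains val)
      = containsSubseq v1 val := by
  rw [get?_foldl_insert_fn]
  have hmem : ((val.length : Int)) ∈ PySem.Set.ofList (vals.map (fun val => (val.length : Int))) := by
    rw [PySem.Set.mem_ofList]
    exact List.mem_map_of_mem hval
  by_cases hle : val.length ≤ v1.length
  · have hin : ((val.length : Int)) ∈
        (PySem.Set.ofList (vals.map (fun val => (val.length : Int)))).filter
          (fun m => decide (m ≤ (v1.length : Int))) := by
      rw [List.mem_filter]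
      exact ⟨hmem, by simpa using hle⟩
    rw [if_pos hin]
    show (windowSetB v1 (val.length : Int)).contains val = containsSubseq v1 val
    unfold windowSetB containsSubseq
    rw [if_neg (by omega)]
    rw [Bool.eq_iff_iff]
    show List.elem val _ = true ↔ _
    rw [List.elem_iff, PySem.Set.mem_ofList, List.any_eq_true]
    constructor
    · intro h
      obtain ⟨i, hi, he⟩ := List.mem_map.mp h
      exact ⟨i, hi, by rw [he]; exact beq_self_eq_true val⟩
    · rintro ⟨i, hi, he⟩
      rw [beq_iff_eq] at he
      exact List.mem_map.mpr ⟨i, hi, he⟩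
  · have hnin : ((val.length : Int)) ∉
        (PySem.Set.ofList (vals.map (fun val => (val.length : Int)))).filter
          (fun m => decide (m ≤ (v1.length : Int))) := by
      rw [List.mem_filter]
      rintro ⟨-, hd⟩
      simp at hd
      omega
    rw [if_neg hnin]
    show (match (PySem.Dict.empty : PySem.Dict Int (PySem.Set (List String))).get?
        (val.length : Int) with
      | none => false
      | some s => s.contains val) = containsSubseq v1 val
    rw [PySem.Dict.get?_empty]
    unfold containsSubseq
    rw [if_pos (by omega)]

-- ===== VERDICT (by name: the statement is the Claim_ definition above) =====
theorem extract_by_comparison_spec : Claim_equal_extract_by_comparison := by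
  intro v1 v2 _
  unfold Spec_extract_by_comparison extract_by_comparison extract_by_comparison_alt
  simp only []
  rw [PySem.List.foldl_if_add_one, zero_add]
  have hcong : ((PySem.Dict.ofList v2).values).countP (fun val =>
      match (((PySem.Set.ofList ((PySem.Dict.ofList v2).values.map
                (fun val => (val.length : Int)))).filter
              (fun m => decide (m ≤ (v1.length : Int)))).foldl
            (fun d m => d.insert m (windowSetB v1 m)) PySem.Dict.empty).get?
            (val.length : Int) with
        | none => false
        | some s => s.contains val)
      = ((PySem.Dict.ofList v2).values).countP (fun val => containsSubseq v1 val) :=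
    List.countP_congr (by
      intro val hval
      rw [lookup_eq_containsSubseq v1 (PySem.Dict.ofList v2).values val hval])
  rw [hcong]
  have hv : (PySem.Dict.ofList v2).values = (PySem.Dict.ofList v2).items.map (·.2) := rfl
  rw [hv, List.countP_map]
  rfl
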